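-- pv_equiv track=rewrite | github.com/SHS-ComputerScience/GCE | Student Work/Connor Stockbridge/Class Work/my_function.py | string_counter
-- ===== SOURCE A (Python) =====
-- def string_counter(string):
--
-- 	lo_counter = 0
-- 	up_counter = 0
-- 	space_counter = 0
--
-- 	for char in string:
-- 		if(char.isupper()):
-- 			up_counter = up_counter + 1
-- 		elif (char.islower()):
-- 			lo_counter = lo_counter + 1
-- 		else:
-- 			space_counter = space_counter + 1
--
-- 	return(up_counter + lo_counter, space_counter)
-- ===== SOURCE B (Python) =====
-- def _letters(s):
--     if not s:
--         return 0
--     if len(s) == 1: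
--         return 1 if s.isupper() or s.islower() else 0
--     mid = len(s) // 2
--     return _letters(s[:mid]) + _letters(s[mid:])
--
-- def string_counter(string):
--     letters = _letters(string)
--     return (letters, len(string) - letters)
-- ===== Notes on version B (the rewrite author's own statement) =====
-- stated objective: alternative
-- what changed: B counts cased letters by divide-and-conquer (recursively halving the string and summing the halves) instead of A's single linear pass with three running counters, and derives the non-letter count by subtraction from the length.
import Mathlib
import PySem

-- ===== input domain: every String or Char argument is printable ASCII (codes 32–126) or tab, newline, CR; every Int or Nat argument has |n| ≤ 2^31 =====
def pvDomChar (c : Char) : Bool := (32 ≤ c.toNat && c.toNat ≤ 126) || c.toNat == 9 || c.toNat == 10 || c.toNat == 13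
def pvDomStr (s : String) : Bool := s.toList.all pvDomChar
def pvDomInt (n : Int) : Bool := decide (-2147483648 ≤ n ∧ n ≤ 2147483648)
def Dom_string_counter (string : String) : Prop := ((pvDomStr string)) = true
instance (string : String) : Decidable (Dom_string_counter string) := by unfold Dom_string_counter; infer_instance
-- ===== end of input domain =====

-- B counts letters by divide-and-conquer over string halves instead of A's linear three-counter pass.

-- ===== PORT A =====
def string_counter (string : String) : Int × Int :=
  let st := string.toList.foldl
    (fun (acc : Int × Int × Int) char =>
      let (lo, up, sp) := acc
      if PySem.Chars.isupper char then (lo, up + 1, sp)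
      else if PySem.Chars.islower char then (lo + 1, up, sp)
      else (lo, up, sp + 1))
    (0, 0, 0)
  (st.2.1 + st.1, st.2.2)

-- ===== PORT B =====
-- _letters: divide-and-conquer count of cased letters (halving via take/drop = Python slicing)
def lettersDC (cs : List Char) : Int :=
  match cs with
  | [] => 0
  | [c] => if PySem.Chars.isupper c || PySem.Chars.islower c then 1 else 0
  | c1 :: c2 :: rest =>
    lettersDC ((c1 :: c2 :: rest).take ((c1 :: c2 :: rest).length / 2))
      + lettersDC ((c1 :: c2 :: rest).drop ((c1 :: c2 :: rest).length / 2))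
termination_by cs.length
decreasing_by
  · simp [List.length_take]; omega
  · simp [List.length_drop]; omega

def string_counter_alt (string : String) : Int × Int :=
  let letters := lettersDC string.toList
  (letters, (PySem.Str.len string : Int) - letters)

-- ===== PRECONDITION & SPEC =====
def Spec_string_counter (string : String) (out : Int × Int) : Prop := out = string_counter_alt string
instance (string : String) (out : Int × Int) : Decidable (Spec_string_counter string out) := by unfold Spec_string_counter; infer_instance

-- ===== CLAIM (what is proved, stated in full; the proofs are below) =====
def Claim_equal_string_counter : Prop := ∀ (string : String), Dom_string_counter string → Spec_string_counter string (string_counter string)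

-- ===== LEMMAS AND PROOFS =====

-- Loop invariant for A's fold.
theorem string_counter_fold_eq (cs : List Char) (lo up sp : Int) :
    cs.foldl
      (fun (acc : Int × Int × Int) char =>
        let (lo, up, sp) := acc
        if PySem.Chars.isupper char then (lo, up + 1, sp)
        else if PySem.Chars.islower char then (lo + 1, up, sp)
        else (lo, up, sp + 1))
      (lo, up, sp)
    = (lo + (cs.countP (fun c => !PySem.Chars.isupper c && PySem.Chars.islower c) : Int),
       up + (cs.countP (fun c => PySem.Chars.isupper c) : Int),
       sp + (cs.countP (fun c => !PySem.Chars.isupper c && !PySem.Chars.islower c) : Int)) := by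
  induction cs generalizing lo up sp with
  | nil => simp
  | cons c cs ih =>
    simp only [List.foldl_cons, List.countP_cons]
    by_cases hu : PySem.Chars.isupper c <;> by_cases hl : PySem.Chars.islower c <;>
      simp [hu, hl, ih] <;> ring

-- B's divide-and-conquer equals the letter count.
theorem lettersDC_eq (cs : List Char) :
    lettersDC cs = (cs.countP (fun c => PySem.Chars.isupper c || PySem.Chars.islower c) : Int) := by
  induction cs using lettersDC.induct with
  | case1 => simp [lettersDC]
  | case2 c h => simp [lettersDC, h]
  | case3 c h => simp [lettersDC, h]
  | case4 c1 c2 rest ih1 ih2 =>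
    rw [lettersDC, ih1, ih2]
    rw [← Nat.cast_add, ← List.countP_append, List.take_append_drop]

theorem countP_letter_split (cs : List Char) :
    (cs.countP (fun c => PySem.Chars.isupper c)
      + cs.countP (fun c => !PySem.Chars.isupper c && PySem.Chars.islower c) : Int)
    = (cs.countP (fun c => PySem.Chars.isupper c || PySem.Chars.islower c) : Int) := by
  induction cs with
  | nil => simp
  | cons c cs ih =>
    simp only [List.countP_cons]
    by_cases hu : PySem.Chars.isupper c <;> by_cases hl : PySem.Chars.islower c <;>
      simp [hu, hl] <;> omega

theorem countP_nonletter (cs : List Char) :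
    (cs.countP (fun c => !PySem.Chars.isupper c && !PySem.Chars.islower c) : Int)
    = (cs.length : Int) - (cs.countP (fun c => PySem.Chars.isupper c || PySem.Chars.islower c) : Int) := by
  induction cs with
  | nil => simp
  | cons c cs ih =>
    simp only [List.countP_cons, List.length_cons]
    by_cases hu : PySem.Chars.isupper c <;> by_cases hl : PySem.Chars.islower c <;>
      simp [hu, hl, ih] <;> omega

-- ===== VERDICT (by name: the statement is the Claim_ definition above) =====
theorem string_counter_spec : Claim_equal_string_counter := by
  intro s _
  unfold Spec_string_counter string_counter string_counter_alt
  simp only [string_counter_fold_eq, lettersDC_eq, PySem.Str.len]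
  have h1 := countP_letter_split s.toList
  have h2 := countP_nonletter s.toList
  simp only [Prod.mk.injEq]
  omega
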